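-- pv_equiv track=rewrite | github.com/XavierFrassinelli/generateur-sti2d-v2 | projet_sti2d/planning_common.py | _expand_comp_refs_for_pb
-- ===== SOURCE A (Python) =====
-- def _expand_comp_refs_for_pb(comp_knowledge_refs, pb_knowledge_refs):
--     pb_list = list(pb_knowledge_refs or [])
--     pb_set = set(pb_list)
--     result = []
--     for co_ref in comp_knowledge_refs or []:
--         co_ref = str(co_ref or "").strip()
--         if not co_ref:
--             continue
--         if co_ref in pb_set and co_ref not in result:
--             result.append(co_ref)
--             continue
--         if "-" not in co_ref:
--             prefix = f"{co_ref}-"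
--             for pb_ref in pb_list:
--                 if pb_ref.startswith(prefix) and pb_ref not in result:
--                     result.append(pb_ref)
--     return result
-- ===== SOURCE B (Python) =====
-- def _expand_comp_refs_for_pb(comp_knowledge_refs, pb_knowledge_refs):
--     pb_list = list(pb_knowledge_refs or [])
--     pb_set = set(pb_list)
--     # group pb refs by their segment before the first '-' (only refs containing '-')
--     groups = {}
--     for pb_ref in pb_list:
--         head, sep, _ = pb_ref.partition("-")
--         if sep:
--             groups.setdefault(head, []).append(pb_ref)
--     result = []
--     seen = set()
--     for co_ref in comp_knowledge_refs or []:
--         co_ref = str(co_ref or "").strip()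
--         if not co_ref:
--             continue
--         if co_ref in pb_set and co_ref not in seen:
--             result.append(co_ref)
--             seen.add(co_ref)
--             continue
--         if "-" not in co_ref:
--             for pb_ref in groups.get(co_ref, ()):
--                 if pb_ref not in seen:
--                     result.append(pb_ref)
--                     seen.add(pb_ref)
--     return result
-- ===== Notes on version B (the rewrite author's own statement) =====
-- stated objective: faster
-- what changed: A rescans the whole pb list per component ref to find prefix matches; B builds a dict grouping pb refs once by their segment before the first '-' and a seen-set for O(1) dedup, so each component ref is a single dict lookup.
import Mathlib
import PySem

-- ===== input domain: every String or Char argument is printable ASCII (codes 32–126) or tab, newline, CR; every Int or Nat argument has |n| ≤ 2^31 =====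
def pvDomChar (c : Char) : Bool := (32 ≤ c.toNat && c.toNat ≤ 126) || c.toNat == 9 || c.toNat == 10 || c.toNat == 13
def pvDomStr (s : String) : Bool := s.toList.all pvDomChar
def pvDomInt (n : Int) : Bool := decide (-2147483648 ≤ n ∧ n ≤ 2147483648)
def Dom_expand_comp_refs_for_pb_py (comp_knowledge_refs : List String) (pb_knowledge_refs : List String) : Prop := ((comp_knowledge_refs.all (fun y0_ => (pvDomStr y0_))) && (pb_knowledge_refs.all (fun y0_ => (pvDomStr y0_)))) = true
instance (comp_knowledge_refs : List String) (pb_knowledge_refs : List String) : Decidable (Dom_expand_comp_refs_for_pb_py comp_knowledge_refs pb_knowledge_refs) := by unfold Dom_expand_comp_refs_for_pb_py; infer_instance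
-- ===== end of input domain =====

-- B replaces A's inner scan of all pb refs per component ref by a dict of pb refs
-- grouped once by their segment before the first '-', plus a 'seen' set for dedup
-- (O(comp+pb) vs A's O(comp*pb)); return values proved equal on all inputs.

-- ===== PORT A =====
-- note: on string inputs Python's `str(co_ref or "").strip()` is just `.strip()`
def expand_comp_refs_for_pb_py (comp_knowledge_refs : List String) (pb_knowledge_refs : List String) : List String :=
  let pb_list := pb_knowledge_refs
  let pb_set := PySem.Set.ofList pb_list
  comp_knowledge_refs.foldl (fun result co0 =>
    let co_ref := PySem.Str.strip co0
    if co_ref = "" then result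
    else if PySem.Set.contains pb_set co_ref = true ∧ co_ref ∉ result then result ++ [co_ref]
    else if PySem.Str.isIn "-" co_ref = false then
      let pre := String.ofList (co_ref.toList ++ ['-'])   -- f"{co_ref}-"
      pb_list.foldl (fun r pb_ref =>
        if PySem.Str.startswith pb_ref pre = true ∧ pb_ref ∉ r then r ++ [pb_ref] else r) result
    else result) []

-- ===== PORT B =====
-- p.partition("-")[0]; exact for the one-character separator "-"
def pvNotDash (c : Char) : Bool := c ≠ '-'
def pvHead (p : String) : String := String.ofList (p.toList.takeWhile pvNotDash)

def expand_comp_refs_for_pb_py_alt (comp_knowledge_refs : List String) (pb_knowledge_refs : List String) : List String :=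
  let pb_list := pb_knowledge_refs
  let pb_set := PySem.Set.ofList pb_list
  let dashed := (pb_list.filter (fun p => PySem.Str.isIn "-" p)).map (fun p => (pvHead p, p))
  let groups := dashed.foldl (fun d pr => PySem.Dict.modify d pr.1 [] (fun l => l ++ [pr.2])) PySem.Dict.empty
  (comp_knowledge_refs.foldl (fun (st : List String × PySem.Set String) co0 =>
    let co_ref := PySem.Str.strip co0
    if co_ref = "" then st
    else if PySem.Set.contains pb_set co_ref = true ∧ ¬ PySem.Set.contains st.2 co_ref = true then
      (st.1 ++ [co_ref], PySem.Set.add st.2 co_ref)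
    else if PySem.Str.isIn "-" co_ref = false then
      (PySem.Dict.getD groups co_ref []).foldl (fun st2 pb_ref =>
        if ¬ PySem.Set.contains st2.2 pb_ref = true then (st2.1 ++ [pb_ref], PySem.Set.add st2.2 pb_ref)
        else st2) st
    else st) (([] : List String), (PySem.Set.empty : PySem.Set String))).1

-- ===== PRECONDITION & SPEC =====
def Spec_expand_comp_refs_for_pb_py (comp_knowledge_refs : List String) (pb_knowledge_refs : List String) (out : List String) : Prop := out = expand_comp_refs_for_pb_py_alt comp_knowledge_refs pb_knowledge_refs
instance (comp_knowledge_refs : List String) (pb_knowledge_refs : List String) (out : List String) : Decidable (Spec_expand_comp_refs_for_pb_py comp_knowledge_refs pb_knowledge_refs out) := by unfold Spec_expand_comp_refs_for_pb_py; infer_instance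

-- ===== CLAIM (what is proved, stated in full; the proofs are below) =====
def Claim_equal_expand_comp_refs_for_pb_py : Prop := ∀ (comp_knowledge_refs : List String) (pb_knowledge_refs : List String), Dom_expand_comp_refs_for_pb_py comp_knowledge_refs pb_knowledge_refs → Spec_expand_comp_refs_for_pb_py comp_knowledge_refs pb_knowledge_refs (expand_comp_refs_for_pb_py comp_knowledge_refs pb_knowledge_refs)

-- ===== LEMMAS AND PROOFS =====

-- takeWhile over a block of non-'-' chars followed by '-' returns exactly the block
theorem pv_takeWhile_block (cl t : List Char) (h : '-' ∉ cl) :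
    (cl ++ '-' :: t).takeWhile pvNotDash = cl := by
  induction cl with
  | nil =>
    rw [List.nil_append, List.takeWhile_cons]
    have : pvNotDash '-' = false := by decide
    rw [this, if_neg (by simp)]
  | cons a as ih =>
    simp only [List.mem_cons, not_or] at h
    rw [List.cons_append, List.takeWhile_cons]
    have ha : pvNotDash a = true := by simp [pvNotDash]; exact fun he => h.1 he.symm
    rw [ha, if_pos rfl, ih h.2]

-- for co_ref without '-', "pb starts with co_ref + '-'" ≡ "pb contains '-' and its head segment is co_ref"
theorem pv_startswith_iff_head (cl l : List Char) (h : '-' ∉ cl) :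
    ((cl ++ ['-']) <+: l) ↔ ('-' ∈ l ∧ l.takeWhile pvNotDash = cl) := by
  constructor
  · rintro ⟨t, rfl⟩
    refine ⟨by simp, ?_⟩
    simpa using pv_takeWhile_block cl t h
  · rintro ⟨hmem, htw⟩
    have hsplit := List.takeWhile_append_dropWhile (p := pvNotDash) (l := l)
    cases hd : l.dropWhile pvNotDash with
    | nil =>
      exfalso
      rw [hd, List.append_nil] at hsplit
      rw [← hsplit, htw] at hmem
      exact h hmem
    | cons a t' =>
      have hne : l.dropWhile pvNotDash ≠ [] := by rw [hd]; simp
      have hhead := List.head_dropWhile_not pvNotDash hne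
      simp only [hd, List.head_cons] at hhead
      have hhead : a = '-' := by simpa [pvNotDash] using hhead
      refine ⟨t', ?_⟩
      rw [← hsplit, htw, hd, hhead]
      simp

theorem pv_isIn_dash (s : String) : PySem.Str.isIn "-" s = true ↔ '-' ∈ s.toList := by
  rw [PySem.Str.isIn_eq, PySem.Chars.isIn_iff_infix]
  have hd : ("-" : String).toList = ['-'] := by decide
  rw [hd, List.singleton_infix_iff]

-- the group list looked up for a dash-free co_ref is exactly A's startswith filter of pb
theorem pv_groups_eq (pb : List String) (c : String) (hc : '-' ∉ c.toList) :
    PySem.Dict.getD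
      (((pb.filter (fun p => PySem.Str.isIn "-" p)).map (fun p => (pvHead p, p))).foldl
        (fun d pr => PySem.Dict.modify d pr.1 [] (fun l => l ++ [pr.2])) PySem.Dict.empty) c []
    = pb.filter (fun p => PySem.Str.startswith p (String.ofList (c.toList ++ ['-']))) := by
  rw [PySem.Dict.getD_foldl_modify_append, List.filter_map, List.map_map]
  have hid : (fun x => x.2) ∘ (fun p => ((pvHead p, p) : String × String)) = id := rfl
  rw [hid, List.map_id, List.filter_filter]
  have hempty : (PySem.Dict.empty : PySem.Dict String (List String)).getD c [] = [] := rfl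
  rw [hempty, List.nil_append]
  apply List.filter_congr
  intro p _
  simp only [Function.comp]
  rw [PySem.Str.startswith_eq, Bool.eq_iff_iff, PySem.Chars.startswith_iff]
  have htl : (String.ofList (c.toList ++ ['-'])).toList = c.toList ++ ['-'] := by simp
  rw [htl, pv_startswith_iff_head _ _ hc]
  rw [Bool.and_eq_true, pv_isIn_dash, beq_iff_eq]
  constructor
  · rintro ⟨h2, h1⟩
    refine ⟨h1, ?_⟩
    have := congrArg String.toList h2
    simpa [pvHead] using this
  · rintro ⟨h1, h2⟩
    refine ⟨?_, h1⟩
    apply String.toList_inj.mp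
    simp [pvHead, h2]

-- membership in a PySem.Set-as-list
theorem pv_contains_iff {x : String} {r : List String} :
    PySem.Set.contains r x = true ↔ x ∈ r := by
  simp [PySem.Set.contains]

-- B's inner fold run on a duplicated pair equals A's dedup-append fold, on both components
theorem pv_inner_pair (l : List String) (r : List String) :
    l.foldl (fun (st2 : List String × PySem.Set String) pb_ref =>
        if ¬ PySem.Set.contains st2.2 pb_ref = true then (st2.1 ++ [pb_ref], PySem.Set.add st2.2 pb_ref)
        else st2) (r, r)
    = (l.foldl (fun r' p => if p ∉ r' then r' ++ [p] else r') r,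
       l.foldl (fun r' p => if p ∉ r' then r' ++ [p] else r') r) := by
  induction l generalizing r with
  | nil => rfl
  | cons p t ih =>
    simp only [List.foldl_cons]
    by_cases hp : p ∈ r
    · rw [if_neg (not_not_intro (pv_contains_iff.mpr hp)), if_neg (not_not_intro hp)]
      exact ih r
    · have hc : PySem.Set.contains r p = true → False := fun hx => hp (pv_contains_iff.mp hx)
      have hadd : PySem.Set.add r p = r ++ [p] := by
        simp only [PySem.Set.add]
        rw [if_neg (by simpa [pv_contains_iff] using hp)]
      rw [if_pos hc, if_pos hp, hadd]
      exact ih (r ++ [p])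

-- A's inner startswith scan equals B's dedup fold over the filtered group list
theorem pv_inner_eq (pb : List String) (pre : String) (r : List String) :
    pb.foldl (fun r' pb_ref =>
        if PySem.Str.startswith pb_ref pre = true ∧ pb_ref ∉ r' then r' ++ [pb_ref] else r') r
    = (pb.filter (fun p => PySem.Str.startswith p pre)).foldl
        (fun r' p => if p ∉ r' then r' ++ [p] else r') r := by
  rw [List.foldl_filter]
  apply PySem.List.foldl_congr_mem
  intro r' p _
  by_cases hs : PySem.Chars.startswith p.toList pre.toList = true
  · simp [hs]
  · simp [hs]

-- main loop invariant: B's fold carries (result, seen) with seen = result, and equals A's fold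
theorem pv_main (pb comp : List String) (r : List String) :
    (comp.foldl (fun (st : List String × PySem.Set String) co0 =>
      let co_ref := PySem.Str.strip co0
      if co_ref = "" then st
      else if PySem.Set.contains (PySem.Set.ofList pb) co_ref = true ∧ ¬ PySem.Set.contains st.2 co_ref = true then
        (st.1 ++ [co_ref], PySem.Set.add st.2 co_ref)
      else if PySem.Str.isIn "-" co_ref = false then
        (PySem.Dict.getD (((pb.filter (fun p => PySem.Str.isIn "-" p)).map (fun p => (pvHead p, p))).foldl
            (fun d pr => PySem.Dict.modify d pr.1 [] (fun l => l ++ [pr.2])) PySem.Dict.empty) co_ref []).foldl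
          (fun st2 pb_ref =>
            if ¬ PySem.Set.contains st2.2 pb_ref = true then (st2.1 ++ [pb_ref], PySem.Set.add st2.2 pb_ref)
            else st2) st
      else st) (r, r))
    = (comp.foldl (fun result co0 =>
        let co_ref := PySem.Str.strip co0
        if co_ref = "" then result
        else if PySem.Set.contains (PySem.Set.ofList pb) co_ref = true ∧ co_ref ∉ result then result ++ [co_ref]
        else if PySem.Str.isIn "-" co_ref = false then
          pb.foldl (fun r' pb_ref =>
            if PySem.Str.startswith pb_ref (String.ofList (co_ref.toList ++ ['-'])) = true ∧ pb_ref ∉ r' then r' ++ [pb_ref] else r') result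
        else result) r,
       comp.foldl (fun result co0 =>
        let co_ref := PySem.Str.strip co0
        if co_ref = "" then result
        else if PySem.Set.contains (PySem.Set.ofList pb) co_ref = true ∧ co_ref ∉ result then result ++ [co_ref]
        else if PySem.Str.isIn "-" co_ref = false then
          pb.foldl (fun r' pb_ref =>
            if PySem.Str.startswith pb_ref (String.ofList (co_ref.toList ++ ['-'])) = true ∧ pb_ref ∉ r' then r' ++ [pb_ref] else r') result
        else result) r) := by
  induction comp generalizing r with
  | nil => rfl
  | cons c0 t ih =>
    simp only [List.foldl_cons]
    by_cases hE : PySem.Str.strip c0 = ""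
    · rw [if_pos hE, if_pos hE]
      exact ih r
    rw [if_neg hE, if_neg hE]
    by_cases h1 : PySem.Set.contains (PySem.Set.ofList pb) (PySem.Str.strip c0) = true
    · by_cases hm : PySem.Str.strip c0 ∈ r
      · rw [if_neg (show ¬((PySem.Set.ofList pb).contains (PySem.Str.strip c0) = true ∧ ¬PySem.Set.contains r (PySem.Str.strip c0) = true) from fun hx => hx.2 (pv_contains_iff.mpr hm)),
            if_neg (show ¬((PySem.Set.ofList pb).contains (PySem.Str.strip c0) = true ∧ PySem.Str.strip c0 ∉ r) from fun hx => hx.2 hm)]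
        by_cases hd : PySem.Str.isIn "-" (PySem.Str.strip c0) = false
        · rw [if_pos hd, if_pos hd]
          have hcd : '-' ∉ (PySem.Str.strip c0).toList := by
            intro hmem
            have := (pv_isIn_dash (PySem.Str.strip c0)).mpr hmem
            rw [hd] at this
            cases this
          rw [pv_groups_eq pb _ hcd, pv_inner_pair, ← pv_inner_eq]
          exact ih _
        · rw [if_neg hd, if_neg hd]
          exact ih r
      · have hcond : PySem.Set.contains (PySem.Set.ofList pb) (PySem.Str.strip c0) = true ∧
            ¬ PySem.Set.contains r (PySem.Str.strip c0) = true :=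
          ⟨h1, fun hx => hm (pv_contains_iff.mp hx)⟩
        rw [if_pos hcond, if_pos (show (PySem.Set.ofList pb).contains (PySem.Str.strip c0) = true ∧ PySem.Str.strip c0 ∉ r from ⟨h1, hm⟩)]
        have hadd : PySem.Set.add r (PySem.Str.strip c0) = r ++ [PySem.Str.strip c0] := by
          simp only [PySem.Set.add]
          rw [if_neg (by simpa [pv_contains_iff] using hm)]
        rw [hadd]
        exact ih _
    · rw [if_neg (show ¬((PySem.Set.ofList pb).contains (PySem.Str.strip c0) = true ∧ ¬PySem.Set.contains r (PySem.Str.strip c0) = true) from fun hx => h1 hx.1),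
          if_neg (show ¬((PySem.Set.ofList pb).contains (PySem.Str.strip c0) = true ∧ PySem.Str.strip c0 ∉ r) from fun hx => h1 hx.1)]
      by_cases hd : PySem.Str.isIn "-" (PySem.Str.strip c0) = false
      · rw [if_pos hd, if_pos hd]
        have hcd : '-' ∉ (PySem.Str.strip c0).toList := by
          intro hmem
          have := (pv_isIn_dash (PySem.Str.strip c0)).mpr hmem
          rw [hd] at this
          cases this
        rw [pv_groups_eq pb _ hcd, pv_inner_pair, ← pv_inner_eq]
        exact ih _
      · rw [if_neg hd, if_neg hd]
        exact ih r

-- ===== VERDICT (by name: the statement is the Claim_ definition above) =====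
theorem expand_comp_refs_for_pb_py_spec : Claim_equal_expand_comp_refs_for_pb_py := by
  intro comp pb _
  unfold Spec_expand_comp_refs_for_pb_py
  show expand_comp_refs_for_pb_py comp pb = expand_comp_refs_for_pb_py_alt comp pb
  simp only [expand_comp_refs_for_pb_py, expand_comp_refs_for_pb_py_alt]
  have he : (PySem.Set.empty : PySem.Set String) = ([] : List String) := rfl
  rw [he, pv_main]
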